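-- pv_equiv track=rewrite | github.com/JadenKim-dev/algorithm-study | 2025-python/2025_code_challenge/서버증설횟수.py | solution
-- ===== SOURCE A (Python) =====
-- from collections import deque
--
-- def solution(players, m, k):
--     queue = deque()
--     servers = 0
--     answer = 0
--     for time in range(len(players)):
--         if queue:
--             n, deadline = queue[0]
--             if deadline <= time:
--                 queue.popleft()
--                 servers -= n
--         if players[time] >= (servers + 1) * m:
--             diff = players[time] // m - servers
--             queue.append((diff, time + k))
--             servers += diff
--             answer += diff
--     return answer
-- ===== SOURCE B (Python) =====
-- def solution(players, m, k):
--     # Staged arithmetic formulation: a prefix-sum array of additions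
--     # (pre[i] = total additions made before step i); the additions still
--     # active at step t are a prefix-sum window, no queue / expiry
--     # bookkeeping and no mutable server counter.
--     pre = [0]
--     for t in range(len(players)):
--         active = pre[t] - pre[max(0, t - k + 1)]
--         add = players[t] // m - active if players[t] >= (active + 1) * m else 0
--         pre.append(pre[t] + add)
--     return pre[len(players)]
-- ===== Notes on version B (the rewrite author's own statement) =====
-- stated objective: alternative
-- what changed: Replaces A's event simulation (mutable server counter plus a deque of (amount, deadline) groups popped at the front) by a staged arithmetic formulation: a prefix-sum array of additions, each step's addition computed against a prefix-sum window (the still-active additions); no queue, no expiry pops, no server variable.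
-- outside the precondition, e.g. on solution([5, 5], 2, 0): A returns 4, B raises IndexError
import Mathlib
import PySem

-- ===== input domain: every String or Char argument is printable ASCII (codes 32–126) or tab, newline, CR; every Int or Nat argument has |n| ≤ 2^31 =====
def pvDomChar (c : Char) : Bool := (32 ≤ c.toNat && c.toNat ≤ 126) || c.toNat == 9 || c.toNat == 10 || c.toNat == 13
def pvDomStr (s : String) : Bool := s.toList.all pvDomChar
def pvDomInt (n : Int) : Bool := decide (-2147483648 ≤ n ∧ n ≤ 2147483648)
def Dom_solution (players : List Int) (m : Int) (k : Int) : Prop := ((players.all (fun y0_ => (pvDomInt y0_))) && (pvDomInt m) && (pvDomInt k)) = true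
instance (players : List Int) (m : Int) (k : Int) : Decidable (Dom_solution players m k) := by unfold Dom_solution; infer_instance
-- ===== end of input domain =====

-- B drops A's event simulation (deque of expiring groups + mutable server counter) for a
-- staged arithmetic formulation over a prefix-sum array of additions: alternative decomposition.

-- ===== PORT A =====
-- `for time in range(len(players))` as structural recursion on the remaining iteration count
def solutionLoopA (players : List Int) (m : Int) (k : Int) :
    Nat → Nat → List (Int × Int) → Int → Int → Int
  | 0, _, _, _, answer => answer
  | fuel+1, time, queue, servers, answer =>
    -- if queue: n, deadline = queue[0]; if deadline <= time: queue.popleft(); servers -= n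
    let st :=
      match queue with
      | [] => (queue, servers)
      | (n, deadline) :: rest =>
        if deadline ≤ (time : Int) then (rest, servers - n) else (queue, servers)
    if players.getD time 0 ≥ (st.2 + 1) * m then
      let diff := PySem.Int.floordiv (players.getD time 0) m - st.2
      solutionLoopA players m k fuel (time + 1) (st.1 ++ [(diff, (time : Int) + k)])
        (st.2 + diff) (answer + diff)
    else
      solutionLoopA players m k fuel (time + 1) st.1 st.2 answer

def solution (players : List Int) (m : Int) (k : Int) : Int :=
  solutionLoopA players m k players.length 0 [] 0 0

-- ===== PORT B =====
-- Source B's loop: pre[i] = total additions made before step i; in-range list indexing is ported as getD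
def solutionLoopB (players : List Int) (m : Int) (k : Int) :
    Nat → Nat → List Int → List Int
  | 0, _, pre => pre
  | fuel+1, t, pre =>
    let active := pre.getD t 0 - pre.getD (max 0 ((t : Int) - k + 1)).toNat 0
    let add := if players.getD t 0 ≥ (active + 1) * m then
        PySem.Int.floordiv (players.getD t 0) m - active
      else 0
    solutionLoopB players m k fuel (t + 1) (pre ++ [pre.getD t 0 + add])

def solution_alt (players : List Int) (m : Int) (k : Int) : Int :=
  (solutionLoopB players m k players.length 0 [0]).getD players.length 0

-- ===== PRECONDITION & SPEC =====
-- Pre_ restricts to the problem's natural domain: m = 0 makes A raise ZeroDivisionError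
-- as soon as the addition test fires (i.e. unless every demand is negative), and a
-- non-positive rental period k ≤ 0 is outside the task's domain (k is a positive duration);
-- there no expiry schedule is specified, A pops groups immediately while B's prefix-sum
-- window is degenerate (B raises IndexError once the loop runs).
def Pre_solution (players : List Int) (m : Int) (k : Int) : Prop :=
  (m ≠ 0 ∨ ∀ p ∈ players, p < 0) ∧ (1 ≤ k ∨ players = [])
instance (players : List Int) (m : Int) (k : Int) : Decidable (Pre_solution players m k) := by unfold Pre_solution; infer_instance

def pvWitness_solution : List Int × Int × Int := ([5, 0, 6, 2], 2, 1)

def Spec_solution (players : List Int) (m : Int) (k : Int) (out : Int) : Prop := out = solution_alt players m k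
instance (players : List Int) (m : Int) (k : Int) (out : Int) : Decidable (Spec_solution players m k out) := by unfold Spec_solution; infer_instance

-- ===== CLAIM (what is proved, stated in full; the proofs are below) =====
def Claim_equal_solution : Prop := ∀ (players : List Int) (m : Int) (k : Int), Dom_solution players m k → Pre_solution players m k → Spec_solution players m k (solution players m k)

-- ===== LEMMAS AND PROOFS =====

-- amount scheduled to expire at instant j according to A's queue (deadlines are distinct)
def dval (queue : List (Int × Int)) (j : Int) : Int :=
  ((queue.find? (fun p => p.2 == j)).map (·.1)).getD 0

theorem dval_nil (j : Int) : dval [] j = 0 := rfl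

theorem dval_eq_zero_of_ne (queue : List (Int × Int)) (j : Int)
    (h : ∀ p ∈ queue, p.2 ≠ j) : dval queue j = 0 := by
  unfold dval
  rw [List.find?_eq_none.mpr (by intro p hp; simpa using h p hp)]
  rfl

theorem dval_cons_eq (n j : Int) (rest : List (Int × Int)) :
    dval ((n, j) :: rest) j = n := by
  unfold dval
  rw [List.find?_cons_of_pos (by simp)]
  rfl

theorem dval_cons_ne (n d j : Int) (rest : List (Int × Int)) (h : d ≠ j) :
    dval ((n, d) :: rest) j = dval rest j := by
  unfold dval
  rw [List.find?_cons_of_neg (by simpa using h)]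

theorem dval_append_ne (l : List (Int × Int)) (x : Int × Int) (j : Int) (h : x.2 ≠ j) :
    dval (l ++ [x]) j = dval l j := by
  unfold dval
  rw [List.find?_append]
  cases hq : l.find? (fun p => p.2 == j) with
  | some p => simp
  | none => simp [h]

theorem dval_append_eq (l : List (Int × Int)) (x : Int × Int)
    (h : ∀ p ∈ l, p.2 ≠ x.2) : dval (l ++ [x]) x.2 = x.1 := by
  unfold dval
  rw [List.find?_append, List.find?_eq_none.mpr (by intro p hp; simpa using h p hp)]
  simp

theorem getD_append_lt (l : List Int) (x : Int) (i : Nat) (h : i < l.length) :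
    (l ++ [x]).getD i 0 = l.getD i 0 := by
  simp [List.getD, List.getElem?_append_left h]

theorem getD_append_self (l : List Int) (x : Int) :
    (l ++ [x]).getD l.length 0 = x := by
  simp [List.getD]

-- main invariant: A's simulation state (queue, servers, answer) tracks B's prefix-sum array
theorem loop_eq (players : List Int) (m : Int) (k : Int) (hk : 1 ≤ k) :
    ∀ (fuel t : Nat) (queue : List (Int × Int)) (pre : List Int) (servers answer : Int),
      fuel = players.length - t → t ≤ players.length →
      pre.length = t + 1 →
      answer = pre.getD t 0 →
      servers = pre.getD t 0 - pre.getD ((t : Int) - k).toNat 0 →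
      queue.Pairwise (fun a b => a.2 < b.2) →
      (∀ p ∈ queue, (t : Int) ≤ p.2 ∧ p.2 < (t : Int) + k) →
      (∀ j : Nat, t ≤ j → (j : Int) < (t : Int) + k →
        dval queue (j : Int) =
          (if (j : Int) < k then 0
           else pre.getD (((j : Int) - k).toNat + 1) 0 - pre.getD (((j : Int) - k).toNat) 0)) →
      solutionLoopA players m k fuel t queue servers answer =
        (solutionLoopB players m k fuel t pre).getD players.length 0 := by
  intro fuel
  induction fuel with
  | zero =>
    intro t queue pre servers answer hfuel ht _ hans _ _ _ _
    have hteq : t = players.length := by omega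
    subst hteq
    simpa [solutionLoopA, solutionLoopB] using hans
  | succ fuel ih =>
    intro t queue pre servers answer hfuel ht hlen hans hsrv hpw hbnd hdv
    have htlt : t < players.length := by omega
    rw [solutionLoopA.eq_def, solutionLoopB.eq_def]
    simp only []
    set st := (match queue with
      | [] => (queue, servers)
      | (n, deadline) :: rest =>
        if deadline ≤ (t : Int) then (rest, servers - n) else (queue, servers)) with hst
    have key : st.2 = servers - dval queue (t : Int) ∧
        st.1.Pairwise (fun a b => a.2 < b.2) ∧
        (∀ p ∈ st.1, (t : Int) + 1 ≤ p.2 ∧ p.2 < (t : Int) + k) ∧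
        (∀ j : Int, j ≠ (t : Int) → dval st.1 j = dval queue j) := by
      cases queue with
      | nil =>
        simp only [hst]
        exact ⟨by rw [dval_nil]; ring, List.Pairwise.nil, by simp, by simp⟩
      | cons hd rest =>
        obtain ⟨n, deadline⟩ := hd
        have hhd := hbnd (n, deadline) List.mem_cons_self
        have hrest_gt : ∀ p ∈ rest, deadline < p.2 := (List.pairwise_cons.mp hpw).1
        by_cases hd' : deadline ≤ (t : Int)
        · have hdeq : deadline = (t : Int) := le_antisymm hd' hhd.1
          simp only [hst, hd', if_pos]
          refine ⟨by rw [hdeq, dval_cons_eq], (List.pairwise_cons.mp hpw).2, ?_, ?_⟩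
          · intro p hp
            have h1 := hbnd p (List.mem_cons_of_mem _ hp)
            have h2 := hrest_gt p hp
            constructor <;> omega
          · intro j hj
            rw [dval_cons_ne _ _ _ _ (by omega)]
        · simp only [hst, hd', if_neg, not_false_iff]
          have hall : ∀ p ∈ (n, deadline) :: rest, (t : Int) < p.2 := by
            intro p hp
            rcases List.mem_cons.mp hp with h | h
            · subst h; omega
            · have := hrest_gt p h; omega
          refine ⟨?_, hpw, ?_, by simp⟩
          · rw [dval_eq_zero_of_ne _ _ (by intro p hp; have := hall p hp; omega)]
            ring
          · intro p hp
            have h1 := hall p hp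
            have h2 := hbnd p hp
            constructor <;> omega
    obtain ⟨hs, hpw', hbnd', hdv'⟩ := key
    have hdt := hdv t le_rfl (by omega)
    -- the popped server count equals B's window sum `active`
    have hact : st.2 = pre.getD t 0 - pre.getD ((t : Int) - k + 1).toNat 0 := by
      rw [hs, hsrv, hdt]
      by_cases hc : (t : Int) < k
      · rw [if_pos hc]
        have e1 : ((t : Int) - k).toNat = ((t : Int) - k + 1).toNat := by omega
        rw [e1]; ring
      · rw [if_neg hc]
        have e2 : ((t : Int) - k + 1).toNat = ((t : Int) - k).toNat + 1 := by omega
        rw [e2]; ring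
    have hmax : (max 0 ((t : Int) - k + 1)).toNat = ((t : Int) - k + 1).toNat := by omega
    rw [hmax]
    set active := pre.getD t 0 - pre.getD ((t : Int) - k + 1).toNat 0 with hactive
    -- A's addition test against the popped counter is B's test against the window sum
    have hcond_iff : (players.getD t 0 ≥ (st.2 + 1) * m) ↔
        (players.getD t 0 ≥ (active + 1) * m) := by rw [hact]
    by_cases hcond : players.getD t 0 ≥ (st.2 + 1) * m
    · rw [if_pos hcond, if_pos (hcond_iff.mp hcond)]
      set diff := PySem.Int.floordiv (players.getD t 0) m - st.2 with hdiff
      have hdadd : diff = PySem.Int.floordiv (players.getD t 0) m - active := by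
        rw [hdiff, hact]
      apply ih
      · omega
      · omega
      · simp [hlen]
      · have e : t + 1 = pre.length := by omega
        rw [e, getD_append_self, hans, hdadd]
      · have e : t + 1 = pre.length := by omega
        rw [e, getD_append_self]
        have e2 : ((pre.length : Int) - k).toNat = ((t : Int) - k + 1).toNat := by
          omega
        rw [e2, getD_append_lt _ _ _ (by omega), hact, hdadd]
        ring
      · rw [List.pairwise_append]
        refine ⟨hpw', List.pairwise_singleton _ _, ?_⟩
        intro a ha b hb
        rw [List.mem_singleton.mp hb]
        exact (hbnd' a ha).2
      · intro p hp
        rcases List.mem_append.mp hp with h | h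
        · have := hbnd' p h
          push_cast
          constructor <;> omega
        · rw [List.mem_singleton.mp h]
          push_cast
          constructor <;> omega
      · intro j hj hjk
        by_cases hje : (j : Int) = (t : Int) + k
        · rw [hje, dval_append_eq _ _ (by intro p hp; have := (hbnd' p hp).2; simp only []; omega),
            if_neg (by omega)]
          have e2 : (((t : Int) + k) - k).toNat + 1 = pre.length := by omega
          have e1 : (((t : Int) + k) - k).toNat = t := by omega
          rw [e2, getD_append_self, e1, getD_append_lt _ _ _ (by omega)]
          have efst : ((diff, (t : Int) + k)).1 = diff := rfl
          rw [efst, hdadd]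
          ring
        · rw [dval_append_ne _ _ _ (by simp only []; omega),
            hdv' _ (by omega),
            hdv j (by omega) (by push_cast at hjk ⊢; omega)]
          by_cases hjc : (j : Int) < k
          · rw [if_pos hjc, if_pos hjc]
          · rw [if_neg hjc, if_neg hjc,
              getD_append_lt _ _ _ (by push_cast at hjk; omega),
              getD_append_lt _ _ _ (by push_cast at hjk; omega)]
    · rw [if_neg hcond, if_neg (by rw [← hcond_iff]; exact hcond)]
      apply ih
      · omega
      · omega
      · simp [hlen]
      · have e : t + 1 = pre.length := by omega
        rw [e, getD_append_self, hans]
        ring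
      · have e : t + 1 = pre.length := by omega
        rw [e, getD_append_self]
        have e2 : ((pre.length : Int) - k).toNat = ((t : Int) - k + 1).toNat := by
          omega
        rw [e2, getD_append_lt _ _ _ (by omega), hact]
        ring
      · exact hpw'
      · intro p hp
        have := hbnd' p hp
        push_cast
        constructor <;> omega
      · intro j hj hjk
        by_cases hje : (j : Int) = (t : Int) + k
        · rw [hje, dval_eq_zero_of_ne _ _ (by intro p hp; have := (hbnd' p hp).2; omega),
            if_neg (by omega)]
          have e2 : (((t : Int) + k) - k).toNat + 1 = pre.length := by omega
          have e1 : (((t : Int) + k) - k).toNat = t := by omega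
          rw [e2, getD_append_self, e1, getD_append_lt _ _ _ (by omega)]
          ring
        · rw [hdv' _ (by omega),
            hdv j (by omega) (by push_cast at hjk ⊢; omega)]
          by_cases hjc : (j : Int) < k
          · rw [if_pos hjc, if_pos hjc]
          · rw [if_neg hjc, if_neg hjc,
              getD_append_lt _ _ _ (by push_cast at hjk; omega),
              getD_append_lt _ _ _ (by push_cast at hjk; omega)]

-- ===== VERDICT (by name: the statement is the Claim_ definition above) =====
theorem solution_spec : Claim_equal_solution := by
  intro players m k _ hpre
  unfold Spec_solution solution solution_alt
  rcases hpre.2 with hk | hnil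
  case inr => subst hnil; rfl
  refine loop_eq players m k hk players.length 0 [] [0] 0 0
    (by omega) (by omega) (by simp) (by simp [List.getD]) ?_ List.Pairwise.nil (by simp) ?_
  · simp [List.getD]
  · intro j _ hj
    rw [dval_nil, if_pos (by push_cast at hj ⊢; omega)]
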